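-- pv_equiv track=rewrite | github.com/Juliussondergaard/belief-revision-engine | logic_utils.py | resolve
-- ===== SOURCE A (Python) =====
-- def negate(expr):
--     """
--     Negates a proposition. If already negated, removes the negation.
--     """
--     if expr.startswith('~'):
--         return expr[1:]
--     else:
--         return '~' + expr
--
-- def resolve(ci, cj):
--     """
--     Applies the resolution rule between two clauses.
--     """
--     resolvents = set()
--     for di in ci:
--         for dj in cj:
--             if di == negate(dj):
--                 new_clause = (ci - {di}) | (cj - {dj})
--                 resolvents.add(frozenset(new_clause))
--     return resolvents
-- ===== SOURCE B (Python) =====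
-- def negate(expr):
--     """
--     Negates a proposition. If already negated, removes the negation.
--     """
--     if expr.startswith('~'):
--         return expr[1:]
--     else:
--         return '~' + expr
--
-- def resolve(ci, cj):
--     """
--     Resolution by sort-merge join: sort ci's literals and sort cj's literals
--     by their negation, then a single linear merge finds every dj in cj whose
--     negation occurs in ci; each match yields one resolvent.
--     """
--     xs = sorted(ci)
--     zs = sorted(cj, key=negate)
--     matches = []
--     i = j = 0
--     while i < len(xs) and j < len(zs):
--         k = negate(zs[j])
--         if k < xs[i]:
--             j += 1
--         elif xs[i] < k:
--             i += 1
--         else: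
--             matches.append(zs[j])
--             j += 1
--     return {frozenset((ci - {negate(dj)}) | (cj - {dj})) for dj in matches}
-- ===== Notes on version B (the rewrite author's own statement) =====
-- stated objective: faster
-- what changed: A scans all (di, dj) pairs with a nested loop; B sorts ci and sorts cj by the negation key, then a single two-pointer merge join finds every literal of cj whose negation occurs in ci, and one pass over the matches builds the resolvents.
import Mathlib
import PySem

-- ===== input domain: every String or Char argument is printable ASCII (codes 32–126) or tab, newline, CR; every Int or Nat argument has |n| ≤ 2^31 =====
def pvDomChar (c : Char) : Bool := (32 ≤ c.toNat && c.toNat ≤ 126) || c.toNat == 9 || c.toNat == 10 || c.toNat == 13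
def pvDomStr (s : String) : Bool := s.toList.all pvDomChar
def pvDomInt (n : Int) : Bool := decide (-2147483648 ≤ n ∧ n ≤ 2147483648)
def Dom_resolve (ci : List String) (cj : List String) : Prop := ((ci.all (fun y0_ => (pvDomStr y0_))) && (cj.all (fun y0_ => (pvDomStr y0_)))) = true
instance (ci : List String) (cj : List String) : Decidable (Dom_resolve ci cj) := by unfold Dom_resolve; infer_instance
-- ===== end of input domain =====

-- B replaces A's nested scan over all (di, dj) pairs by a sort-merge join: sort ci, sort cj by the
-- negation key, and one linear two-pointer merge finds every resolvable literal of cj.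
-- Python returns a SET of FROZENSETS; both ports represent each frozenset as its sorted element list
-- and the returned set as the sorted list of those (a canonical listing of the same finite set of sets).


-- ===== PORT A =====
-- shared helper `negate` (identical in Source A and Source B)
def pyNegate (expr : String) : String :=
  if PySem.Str.startswith expr "~" then PySem.Str.slice expr (some 1) none
  else "~" ++ expr

-- frozenset((ci - {di}) | (cj - {dj})), represented canonically as its sorted list of elements
def mkClause (ci : List String) (cj : List String) (di : String) (dj : String) : List String :=
  PySem.List.sorted
    (PySem.Set.union (PySem.Set.ofList (ci.filter (fun x => x != di))) (cj.filter (fun x => x != dj)))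
    (fun x => x) false

-- sorted listing of a set of clauses (the canonical representation of the returned Python set);
-- the explicit instances pick the lexicographic linear order on List String
def sortedClauses (xs : List (List String)) : List (List String) :=
  @PySem.List.sorted (List String) (List String) List.instLinearOrder.toLT
    LinearOrder.toDecidableLT xs (fun x => x) false

def resolve (ci : List String) (cj : List String) : List (List String) :=
  let resolvents :=
    ci.foldl (fun acc di =>
      cj.foldl (fun acc dj =>
        if di == pyNegate dj then PySem.Set.add acc (mkClause ci cj di dj) else acc) acc)
      PySem.Set.empty
  sortedClauses resolvents

-- ===== PORT B =====
-- the two-pointer merge join of Source B's while loop: xs = sorted(ci), zs = sorted(cj, key=negate);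
-- emits every dj of zs whose negation occurs in xs
def mergeJoin : List String → List String → List String
  | _, [] => []
  | [], _ :: _ => []
  | x :: xs, z :: zs =>
    let k := pyNegate z
    if k < x then mergeJoin (x :: xs) zs
    else if x < k then mergeJoin xs (z :: zs)
    else z :: mergeJoin (x :: xs) zs
termination_by xs zs => xs.length + zs.length

def resolve_alt (ci : List String) (cj : List String) : List (List String) :=
  let xs := PySem.List.sorted (PySem.Set.ofList ci) (fun x => x) false
  let zs := PySem.List.sorted (PySem.Set.ofList cj) (fun x => pyNegate x) false
  let ms := mergeJoin xs zs
  let resolvents :=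
    ms.foldl (fun acc dj => PySem.Set.add acc (mkClause ci cj (pyNegate dj) dj)) PySem.Set.empty
  sortedClauses resolvents

-- ===== PRECONDITION & SPEC =====
def Spec_resolve (ci : List String) (cj : List String) (out : List (List String)) : Prop := out = resolve_alt ci cj
instance (ci : List String) (cj : List String) (out : List (List String)) : Decidable (Spec_resolve ci cj out) := by unfold Spec_resolve; infer_instance

-- ===== CLAIM (what is proved, stated in full; the proofs are below) =====
def Claim_equal_resolve : Prop := ∀ (ci : List String) (cj : List String), Dom_resolve ci cj → Spec_resolve ci cj (resolve ci cj)

-- ===== LEMMAS AND PROOFS =====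

-- membership in a "if p x then add acc (f x)" accumulation fold
lemma mem_foldl_add_if {α β : Type} [BEq β] [LawfulBEq β] (l : List α) (p : α → Bool) (f : α → β)
    (acc : List β) (y : β) :
    (y ∈ l.foldl (fun a x => if p x then PySem.Set.add a (f x) else a) acc) ↔
      y ∈ acc ∨ ∃ x ∈ l, p x = true ∧ y = f x := by
  induction l generalizing acc with
  | nil => simp
  | cons h t ih =>
    simp only [List.foldl_cons]
    by_cases hp : p h = true
    · simp only [hp, if_true, ih, PySem.Set.mem_add, List.mem_cons]
      constructor
      · rintro ((hy | rfl) | ⟨x, hx, hpx, rfl⟩)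
        · exact Or.inl hy
        · exact Or.inr ⟨h, Or.inl rfl, hp, rfl⟩
        · exact Or.inr ⟨x, Or.inr hx, hpx, rfl⟩
      · rintro (hy | ⟨x, (rfl | hx), hpx, rfl⟩)
        · exact Or.inl (Or.inl hy)
        · exact Or.inl (Or.inr rfl)
        · exact Or.inr ⟨x, hx, hpx, rfl⟩
    · simp only [hp, Bool.false_eq_true, if_false, ih, List.mem_cons]
      constructor
      · rintro (hy | ⟨x, hx, hpx, rfl⟩)
        · exact Or.inl hy
        · exact Or.inr ⟨x, Or.inr hx, hpx, rfl⟩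
      · rintro (hy | ⟨x, (rfl | hx), hpx, rfl⟩)
        · exact Or.inl hy
        · exact absurd hpx hp
        · exact Or.inr ⟨x, hx, hpx, rfl⟩

lemma nodup_foldl_add_if {α β : Type} [BEq β] [LawfulBEq β] (l : List α) (p : α → Bool) (f : α → β)
    (acc : List β) (h : acc.Nodup) :
    (l.foldl (fun a x => if p x then PySem.Set.add a (f x) else a) acc).Nodup := by
  induction l generalizing acc with
  | nil => exact h
  | cons x t ih =>
    simp only [List.foldl_cons]
    by_cases hp : p x = true
    · simp only [hp, if_true]; exact ih _ (PySem.Set.nodup_add _ _ h)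
    · simp only [hp, Bool.false_eq_true, if_false]; exact ih _ h

-- the list accumulated by A's nested loop
lemma mem_resolve_fold (ci cj : List String) (y : List String) :
    (y ∈ ci.foldl (fun acc di =>
        cj.foldl (fun acc dj =>
          if di == pyNegate dj then PySem.Set.add acc (mkClause ci cj di dj) else acc) acc)
        PySem.Set.empty) ↔
      ∃ dj ∈ cj, pyNegate dj ∈ ci ∧ y = mkClause ci cj (pyNegate dj) dj := by
  have main : ∀ (l : List String) (acc : List (List String)),
      (y ∈ l.foldl (fun acc di =>
          cj.foldl (fun acc dj =>
            if di == pyNegate dj then PySem.Set.add acc (mkClause ci cj di dj) else acc) acc) acc) ↔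
        y ∈ acc ∨ ∃ di ∈ l, ∃ dj ∈ cj, di = pyNegate dj ∧ y = mkClause ci cj di dj := by
    intro l
    induction l with
    | nil => simp
    | cons d t ih =>
      intro acc
      simp only [List.foldl_cons, ih]
      rw [mem_foldl_add_if cj (fun dj => d == pyNegate dj) (fun dj => mkClause ci cj d dj) acc y]
      simp only [beq_iff_eq, List.mem_cons]
      constructor
      · rintro (⟨hy | ⟨dj, hdj, rfl, rfl⟩⟩ | ⟨di, hdi, dj, hdj, rfl, rfl⟩)
        · exact Or.inl hy
        · exact Or.inr ⟨_, Or.inl rfl, dj, hdj, rfl, rfl⟩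
        · exact Or.inr ⟨_, Or.inr hdi, dj, hdj, rfl, rfl⟩
      · rintro (hy | ⟨di, (rfl | hdi), dj, hdj, rfl, rfl⟩)
        · exact Or.inl (Or.inl hy)
        · exact Or.inl (Or.inr ⟨dj, hdj, rfl, rfl⟩)
        · exact Or.inr ⟨_, hdi, dj, hdj, rfl, rfl⟩
  rw [main ci PySem.Set.empty]
  constructor
  · rintro (hy | ⟨di, hdi, dj, hdj, rfl, rfl⟩)
    · cases hy
    · exact ⟨dj, hdj, hdi, rfl⟩
  · rintro ⟨dj, hdj, hmem, rfl⟩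
    exact Or.inr ⟨_, hmem, dj, hdj, rfl, rfl⟩

-- membership in the merge join: on a strictly increasing xs and a zs sorted by the negation key,
-- exactly the elements of zs whose negation occurs in xs come out
lemma mem_mergeJoin (xs zs : List String) (hxs : xs.Pairwise (· < ·))
    (hzs : zs.Pairwise (fun a b => pyNegate a ≤ pyNegate b)) (d : String) :
    d ∈ mergeJoin xs zs ↔ d ∈ zs ∧ pyNegate d ∈ xs := by
  fun_induction mergeJoin xs zs with
  | case1 xs => simp
  | case2 z zs => simp
  | case3 x xs z zs k hk ih =>
    rw [List.pairwise_cons] at hzs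
    rw [ih hxs hzs.2]
    rw [List.pairwise_cons] at hxs
    have hznotin : pyNegate z ∉ x :: xs := by
      intro hmem
      rcases List.mem_cons.mp hmem with heq | hmem'
      · exact absurd (heq ▸ hk) (lt_irrefl x)
      · exact absurd (lt_trans hk (hxs.1 _ hmem')) (lt_irrefl _)
    constructor
    · rintro ⟨hd, hn⟩; exact ⟨List.mem_cons_of_mem _ hd, hn⟩
    · rintro ⟨hd, hn⟩
      rcases List.mem_cons.mp hd with rfl | hd'
      · exact absurd hn hznotin
      · exact ⟨hd', hn⟩
  | case4 x xs z zs k hk1 hk2 ih =>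
    rw [List.pairwise_cons] at hxs
    rw [ih hxs.2 hzs]
    have hne : ∀ e, e ∈ z :: zs → pyNegate e ≠ x := by
      intro e he heq
      have hke : k ≤ pyNegate e := by
        rcases List.mem_cons.mp he with rfl | he'
        · exact le_of_eq rfl
        · exact (List.pairwise_cons.mp hzs).1 e he'
      exact absurd (lt_of_lt_of_le hk2 hke) (heq ▸ lt_irrefl x)
    constructor
    · rintro ⟨hd, hn⟩; exact ⟨hd, List.mem_cons_of_mem _ hn⟩
    · rintro ⟨hd, hn⟩
      rcases List.mem_cons.mp hn with heq | hn'
      · exact absurd heq (hne _ hd)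
      · exact ⟨hd, hn'⟩
  | case5 x xs z zs k hk1 hk2 ih =>
    have hkx : k = x := le_antisymm (not_lt.mp hk2) (not_lt.mp hk1)
    rw [List.pairwise_cons] at hzs
    rw [List.mem_cons, ih hxs hzs.2]
    constructor
    · rintro (rfl | ⟨hd, hn⟩)
      · exact ⟨List.mem_cons_self, by rw [show pyNegate d = k from rfl, hkx]; exact List.mem_cons_self⟩
      · exact ⟨List.mem_cons_of_mem _ hd, hn⟩
    · rintro ⟨hd, hn⟩
      rcases List.mem_cons.mp hd with rfl | hd'
      · exact Or.inl rfl
      · exact Or.inr ⟨hd', hn⟩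

-- the list accumulated by B's match loop
lemma mem_resolve_alt_fold (ci cj : List String) (y : List String) :
    (y ∈ (mergeJoin (PySem.List.sorted (PySem.Set.ofList ci) (fun x => x) false)
            (PySem.List.sorted (PySem.Set.ofList cj) (fun x => pyNegate x) false)).foldl
        (fun acc dj => PySem.Set.add acc (mkClause ci cj (pyNegate dj) dj)) PySem.Set.empty) ↔
      ∃ dj ∈ cj, pyNegate dj ∈ ci ∧ y = mkClause ci cj (pyNegate dj) dj := by
  have h1 : ((PySem.List.sorted (PySem.Set.ofList ci) (fun x => x) false) : List String).Pairwise (· < ·) :=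
    PySem.List.sorted_ofList_pairwise_lt ci
  have h2 : ((PySem.List.sorted (PySem.Set.ofList cj) (fun x => pyNegate x) false) : List String).Pairwise
      (fun a b => pyNegate a ≤ pyNegate b) := PySem.List.sorted_pairwise _ _
  have hfold : ∀ (y : List String),
      (y ∈ (mergeJoin (PySem.List.sorted (PySem.Set.ofList ci) (fun x => x) false)
              (PySem.List.sorted (PySem.Set.ofList cj) (fun x => pyNegate x) false)).foldl
          (fun acc dj => PySem.Set.add acc (mkClause ci cj (pyNegate dj) dj)) PySem.Set.empty) ↔
        ∃ dj ∈ mergeJoin (PySem.List.sorted (PySem.Set.ofList ci) (fun x => x) false)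
            (PySem.List.sorted (PySem.Set.ofList cj) (fun x => pyNegate x) false),
          y = mkClause ci cj (pyNegate dj) dj := by
    intro y
    rw [show (fun (acc : List (List String)) dj => PySem.Set.add acc (mkClause ci cj (pyNegate dj) dj)) =
        (fun acc dj => if (fun (_ : String) => true) dj then
          PySem.Set.add acc ((fun dj => mkClause ci cj (pyNegate dj) dj) dj) else acc) from rfl]
    rw [mem_foldl_add_if]
    simp [PySem.Set.empty]
  rw [hfold, ]
  constructor
  · rintro ⟨dj, hdj, rfl⟩
    rw [mem_mergeJoin _ _ h1 h2] at hdj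
    rw [PySem.List.mem_sorted, PySem.Set.mem_ofList] at hdj
    rw [PySem.List.mem_sorted, PySem.Set.mem_ofList] at hdj
    exact ⟨dj, hdj.1, hdj.2, rfl⟩
  · rintro ⟨dj, hdj, hmem, rfl⟩
    refine ⟨dj, ?_, rfl⟩
    rw [mem_mergeJoin _ _ h1 h2, PySem.List.mem_sorted, PySem.Set.mem_ofList,
      PySem.List.mem_sorted, PySem.Set.mem_ofList]
    exact ⟨hdj, hmem⟩

-- ===== VERDICT (by name: the statement is the Claim_ definition above) =====
theorem resolve_spec : Claim_equal_resolve := by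
  intro ci cj _
  show resolve ci cj = resolve_alt ci cj
  show sortedClauses
      (ci.foldl (fun acc di =>
        cj.foldl (fun acc dj =>
          if di == pyNegate dj then PySem.Set.add acc (mkClause ci cj di dj) else acc) acc)
        PySem.Set.empty) =
    sortedClauses
      ((mergeJoin (PySem.List.sorted (PySem.Set.ofList ci) (fun x => x) false)
          (PySem.List.sorted (PySem.Set.ofList cj) (fun x => pyNegate x) false)).foldl
        (fun acc dj => PySem.Set.add acc (mkClause ci cj (pyNegate dj) dj)) PySem.Set.empty)
  unfold sortedClauses
  apply PySem.List.sorted_eq_sorted_of_perm _ _ _ (fun a b h => h)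
  apply (List.perm_ext_iff_of_nodup ?_ ?_).mpr
  · intro y
    rw [mem_resolve_fold, mem_resolve_alt_fold]
  · -- A's accumulation has no duplicates
    have : ∀ (l : List String) (acc : List (List String)), acc.Nodup →
        (l.foldl (fun acc di =>
          cj.foldl (fun acc dj =>
            if di == pyNegate dj then PySem.Set.add acc (mkClause ci cj di dj) else acc) acc)
          acc).Nodup := by
      intro l
      induction l with
      | nil => exact fun _ h => h
      | cons d t ih =>
        intro acc hacc
        exact ih _ (nodup_foldl_add_if cj (fun dj => d == pyNegate dj)
          (fun dj => mkClause ci cj d dj) acc hacc)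
    exact this ci PySem.Set.empty List.nodup_nil
  · exact nodup_foldl_add_if _ (fun (_ : String) => true)
      (fun dj => mkClause ci cj (pyNegate dj) dj) PySem.Set.empty List.nodup_nil
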